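-- pv_equiv track=rewrite | github.com/dripwalking/tour_web | adsman/views.py | _process_long
-- ===== SOURCE A (Python) =====
-- def _split_long(str, step):
--     res= str[:step]
--     tail = str[step:]
--     while len(tail) > 0:
--         res += " " +  tail[:step]
--         tail = tail[step:]
--     return res
--
-- def _process_long (str):
--     step = 70
--     words = str.split(" ")
--     fixed = []
--     str = ""
--     for word in words:
--         if len(word) > step:
--             word = _split_long(word, step)
--         fixed.append(word)
--     str = " ".join(fixed)
--     return str
-- ===== SOURCE B (Python) =====
-- def _process_long(str):
--     out = []
--     cnt = 0
--     for c in str: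
--         if c == " ":
--             out.append(c)
--             cnt = 0
--         elif cnt == 70:
--             out.append(" ")
--             out.append(c)
--             cnt = 1
--         else:
--             out.append(c)
--             cnt += 1
--     return "".join(out)
-- ===== Notes on version B (the rewrite author's own statement) =====
-- stated objective: faster
-- what changed: Replaces the split-on-space / fix-each-long-word-by-slicing / rejoin pipeline with a single left-to-right pass over the characters that keeps a counter of consecutive non-space characters and inserts a space whenever a 71st consecutive one arrives.
import Mathlib
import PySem

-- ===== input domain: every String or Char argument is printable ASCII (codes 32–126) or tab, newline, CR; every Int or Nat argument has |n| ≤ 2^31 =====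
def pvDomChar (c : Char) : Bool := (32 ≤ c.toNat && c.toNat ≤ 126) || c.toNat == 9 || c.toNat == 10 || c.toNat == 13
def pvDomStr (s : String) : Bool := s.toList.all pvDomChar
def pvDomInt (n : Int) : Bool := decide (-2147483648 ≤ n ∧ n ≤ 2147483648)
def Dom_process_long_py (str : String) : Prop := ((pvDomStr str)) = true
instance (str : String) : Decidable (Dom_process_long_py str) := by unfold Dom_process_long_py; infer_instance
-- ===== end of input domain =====

-- B replaces A's split / fix-each-long-word / rejoin pipeline with one character pass
-- keeping a run counter (objective: faster; one pass, no quadratic string concatenation on long words).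

-- ===== PORT A =====
-- _split_long's while loop (A only calls it with step = 70; the 70 is inlined here
-- because for step ≤ 0 the Python loop would not terminate).
def split_long_go (res tail : List Char) : List Char :=
  if _h : 0 < tail.length then
    split_long_go (res ++ [' '] ++ PySem.List.slice tail none (some 70))
      (PySem.List.slice tail (some 70) none)
  else res
termination_by tail.length
decreasing_by
  rw [PySem.List.slice_from tail (by norm_num)]
  simp only [List.length_drop]
  omega

def split_long_py (s : List Char) : List Char :=
  split_long_go (PySem.List.slice s none (some 70)) (PySem.List.slice s (some 70) none)

def process_long_py (str : String) : String :=
  let words := PySem.Chars.splitOn str.toList [' ']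
  let fixed := words.foldl
    (fun acc w => acc ++ [if 70 < w.length then split_long_py w else w]) []
  String.ofList (PySem.Chars.join [' '] fixed)

-- ===== PORT B =====
def pl_step (p : List Char × Nat) (c : Char) : List Char × Nat :=
  if c = ' ' then (p.1 ++ [c], 0)
  else if p.2 = 70 then (p.1 ++ [' ', c], 1)
  else (p.1 ++ [c], p.2 + 1)

def process_long_py_alt (str : String) : String :=
  String.ofList (str.toList.foldl pl_step ([], 0)).1

-- ===== PRECONDITION & SPEC =====
def Spec_process_long_py (str : String) (out : String) : Prop := out = process_long_py_alt str
instance (str : String) (out : String) : Decidable (Spec_process_long_py str out) := by unfold Spec_process_long_py; infer_instance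

-- ===== CLAIM (what is proved, stated in full; the proofs are below) =====
def Claim_equal_process_long_py : Prop := ∀ (str : String), Dom_process_long_py str → Spec_process_long_py str (process_long_py str)

-- ===== LEMMAS AND PROOFS =====

-- (first word, remaining words) of splitting on a single space
def sp : List Char → List Char × List (List Char)
  | [] => ([], [])
  | c :: rest =>
    if c = ' ' then ([], (sp rest).1 :: (sp rest).2)
    else (c :: (sp rest).1, (sp rest).2)

theorem go_spec : ∀ (fuel : Nat) (l cur : List Char) (acc : List (List Char)),
    l.length < fuel →
    PySem.Chars.splitOn.go [' '] fuel l cur acc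
      = acc.reverse ++ (cur.reverse ++ (sp l).1) :: (sp l).2 := by
  intro fuel
  induction fuel with
  | zero => intro l cur acc h; omega
  | succ n ih =>
    intro l cur acc h
    cases l with
    | nil => simp [PySem.Chars.splitOn.go, sp]
    | cons c rest =>
      by_cases hc : c = ' '
      · subst hc
        rw [show PySem.Chars.splitOn.go [' '] (n+1) (' ' :: rest) cur acc
              = PySem.Chars.splitOn.go [' '] n rest [] (cur.reverse :: acc) by
            simp [PySem.Chars.splitOn.go, List.isPrefixOf]]
        rw [ih rest [] (cur.reverse :: acc) (by simpa using Nat.lt_of_succ_lt_succ h)]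
        simp [sp]
      · have hc' : ¬ (' ' = c) := fun e => hc e.symm
        rw [show PySem.Chars.splitOn.go [' '] (n+1) (c :: rest) cur acc
              = PySem.Chars.splitOn.go [' '] n rest (c :: cur) acc by
            simp [PySem.Chars.splitOn.go, List.isPrefixOf, hc']]
        rw [ih rest (c :: cur) acc (by simpa using Nat.lt_of_succ_lt_succ h)]
        simp [sp, hc]

theorem splitOn_eq_sp (cs : List Char) :
    PySem.Chars.splitOn cs [' '] = (sp cs).1 :: (sp cs).2 := by
  show PySem.Chars.splitOn.go [' '] (cs.length + 1) cs [] [] = _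
  rw [go_spec (cs.length + 1) cs [] [] (by omega)]
  simp

-- break-inserting pass on a single space-free word, cnt characters already placed
def fixFrom : Nat → List Char → List Char
  | _, [] => []
  | cnt, c :: w => if cnt = 70 then ' ' :: c :: fixFrom 1 w else c :: fixFrom (cnt + 1) w

-- the chunk list that split_long_go's loop appends
def chunks (t : List Char) : List Char :=
  if _h : t = [] then []
  else ' ' :: (t.take 70 ++ chunks (t.drop 70))
termination_by t.length
decreasing_by
  simp only [List.length_drop]
  have : 0 < t.length := List.length_pos_iff.mpr _h
  omega

theorem fixFrom_eq : ∀ (w : List Char) (cnt : Nat), cnt ≤ 70 →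
    fixFrom cnt w = w.take (70 - cnt) ++ chunks (w.drop (70 - cnt)) := by
  intro w
  induction w with
  | nil => intro cnt _; simp [fixFrom, chunks]
  | cons c w ih =>
    intro cnt hcnt
    by_cases h70 : cnt = 70
    · subst h70
      rw [show fixFrom 70 (c :: w) = ' ' :: c :: fixFrom 1 w by simp [fixFrom]]
      rw [ih 1 (by omega)]
      rw [show (70 : Nat) - 70 = 0 by omega]
      simp only [List.take_zero, List.drop_zero, List.nil_append]
      conv_rhs => rw [chunks]
      simp [show (70:Nat) - 1 = 69 by omega, show (70:Nat) = 69 + 1 by omega,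
        List.take_succ_cons, List.drop_succ_cons]
    · rw [show fixFrom cnt (c :: w) = c :: fixFrom (cnt + 1) w by simp [fixFrom, h70]]
      rw [ih (cnt + 1) (by omega)]
      have h1 : 70 - cnt = (70 - (cnt + 1)) + 1 := by omega
      rw [h1]
      simp [List.take_succ_cons, List.drop_succ_cons]

theorem split_long_go_eq : ∀ (n : Nat) (tail res : List Char), tail.length ≤ n →
    split_long_go res tail = res ++ chunks tail := by
  intro n
  induction n with
  | zero =>
    intro tail res h
    have : tail = [] := by
      cases tail with
      | nil => rfl
      | cons a b => simp at h
    subst this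
    rw [split_long_go, chunks]
    simp
  | succ m ih =>
    intro tail res h
    by_cases hne : tail = []
    · subst hne
      rw [split_long_go, chunks]
      simp
    · have hpos : 0 < tail.length := List.length_pos_iff.mpr hne
      rw [split_long_go]
      simp only [hpos, dif_pos]
      rw [PySem.List.slice_from tail (by norm_num), PySem.List.slice_to tail (by norm_num)]
      simp only [show (Int.toNat 70) = 70 from rfl]
      rw [ih (tail.drop 70) _ (by simp only [List.length_drop]; omega)]
      conv_rhs => rw [chunks]
      simp [hne]

theorem split_long_eq_fixFrom (s : List Char) : split_long_py s = fixFrom 0 s := by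
  rw [split_long_py,
    PySem.List.slice_from s (by norm_num), PySem.List.slice_to s (by norm_num)]
  simp only [show (Int.toNat 70) = 70 from rfl]
  rw [split_long_go_eq (s.drop 70).length _ _ (le_refl _), fixFrom_eq s 0 (by omega)]

theorem fixFrom_short (w : List Char) (h : w.length ≤ 70) : fixFrom 0 w = w := by
  rw [fixFrom_eq w 0 (by omega)]
  simp [List.take_of_length_le h, List.drop_eq_nil_of_le h, chunks]

-- A's per-word fix is fixFrom 0 in either branch
theorem fixA_eq (w : List Char) :
    (if 70 < w.length then split_long_py w else w) = fixFrom 0 w := by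
  by_cases h : 70 < w.length
  · simp [h, split_long_eq_fixFrom]
  · simp [h, fixFrom_short w (by omega)]

theorem join_words : ∀ (ws : List (List Char)) (w : List Char),
    PySem.Chars.join [' '] (w :: ws) = w ++ ws.flatMap (fun v => ' ' :: v) := by
  intro ws
  induction ws with
  | nil => intro w; simp [PySem.Chars.join_singleton]
  | cons v rest ih =>
    intro w
    rw [PySem.Chars.join_cons_cons, ih v]
    simp

theorem foldl_pl_step_acc : ∀ (cs : List Char) (acc : List Char) (cnt : Nat),
    (cs.foldl pl_step (acc, cnt)).1 = acc ++ (cs.foldl pl_step ([], cnt)).1 := by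
  intro cs
  induction cs with
  | nil => intro acc cnt; simp
  | cons c cs ih =>
    intro acc cnt
    simp only [List.foldl_cons]
    by_cases hc : c = ' '
    · rw [show pl_step (acc, cnt) c = (acc ++ [' '], 0) by simp [pl_step, hc],
          show pl_step ([], cnt) c = ([' '], 0) by simp [pl_step, hc],
          ih (acc ++ [' ']) 0, ih [' '] 0]
      simp
    · by_cases h70 : cnt = 70
      · rw [show pl_step (acc, cnt) c = (acc ++ [' ', c], 1) by simp [pl_step, hc, h70],
            show pl_step ([], cnt) c = ([' ', c], 1) by simp [pl_step, hc, h70],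
            ih (acc ++ [' ', c]) 1, ih [' ', c] 1]
        simp
      · rw [show pl_step (acc, cnt) c = (acc ++ [c], cnt + 1) by simp [pl_step, hc, h70],
            show pl_step ([], cnt) c = ([c], cnt + 1) by simp [pl_step, hc, h70],
            ih (acc ++ [c]) (cnt + 1), ih [c] (cnt + 1)]
        simp

theorem pass_eq_sp : ∀ (cs : List Char) (cnt : Nat),
    (cs.foldl pl_step ([], cnt)).1
      = fixFrom cnt (sp cs).1 ++ (sp cs).2.flatMap (fun v => ' ' :: fixFrom 0 v) := by
  intro cs
  induction cs with
  | nil => intro cnt; simp [sp, fixFrom]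
  | cons c cs ih =>
    intro cnt
    simp only [List.foldl_cons]
    by_cases hc : c = ' '
    · rw [show pl_step (([] : List Char), cnt) c = ([' '], 0) by simp [pl_step, hc],
          foldl_pl_step_acc cs [' '] 0, ih 0]
      simp [sp, hc, fixFrom]
    · by_cases h70 : cnt = 70
      · rw [show pl_step (([] : List Char), cnt) c = ([' ', c], 1) by simp [pl_step, hc, h70],
            foldl_pl_step_acc cs [' ', c] 1, ih 1]
        simp [sp, hc, fixFrom, h70]
      · rw [show pl_step (([] : List Char), cnt) c = ([c], cnt + 1) by simp [pl_step, hc, h70],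
            foldl_pl_step_acc cs [c] (cnt + 1), ih (cnt + 1)]
        simp [sp, hc, fixFrom, h70]

-- ===== VERDICT (by name: the statement is the Claim_ definition above) =====
theorem process_long_py_spec : Claim_equal_process_long_py := by
  intro str _
  show process_long_py str = process_long_py_alt str
  rw [process_long_py, process_long_py_alt]
  simp only [splitOn_eq_sp, PySem.List.foldl_append_singleton_eq_map, List.map_cons, fixA_eq, List.nil_append]
  rw [pass_eq_sp str.toList 0, join_words]
  simp [List.flatMap_map]
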